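-- pv_equiv track=rewrite | github.com/ijhoskins/satmut_utils | src/analysis/coordinate_mapper.py | _get_pos_codon_dict
-- ===== SOURCE A (Python) =====
-- import collections
--
-- CODON_TUPLE = collections.namedtuple("CODON_TUPLE", "codon_pos, codon, base_index")
--
-- def _get_pos_codon_dict(cds_seq):
--     """Gets a mapping between index in the coding sequence and codon.
--
--     :param str cds_seq: coding sequence
--     :return dict: index in the CDS: CODON_TUPLE (codon_pos, codon, base_index)
--     """
--
--     cds_dict = {}
--     wobble_positions = set(range(2, len(cds_seq), 3))
--     codon_pos = 0
--
--     for i in range(0, len(cds_seq)):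
--         if (i % 3) == 0:
--             codon_pos += 1
--             curr_codon = cds_seq[i:i + 3]
--             cds_dict[i] = CODON_TUPLE(codon_pos, curr_codon, 0)
--             last_codon = curr_codon
--         else:
--             if i in wobble_positions:
--                 cds_dict[i] = CODON_TUPLE(codon_pos, last_codon, 2)
--             else:
--                 cds_dict[i] = CODON_TUPLE(codon_pos, last_codon, 1)
--
--     return cds_dict
-- ===== SOURCE B (Python) =====
-- import collections
--
-- CODON_TUPLE = collections.namedtuple("CODON_TUPLE", "codon_pos, codon, base_index")
--
-- def _get_pos_codon_dict(cds_seq):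
--     """Chunked rewrite: one codon slice per group of three, inner loop fills the
--     three positions, breaking at the end of a trailing partial codon."""
--     cds_dict = {}
--     codon_pos = 0
--     for start in range(0, len(cds_seq), 3):
--         codon_pos += 1
--         codon = cds_seq[start:start + 3]
--         for j in range(3):
--             if start + j >= len(cds_seq):
--                 break
--             cds_dict[start + j] = CODON_TUPLE(codon_pos, codon, j)
--     return cds_dict
-- ===== Notes on version B (the rewrite author's own statement) =====
-- stated objective: simpler
-- what changed: Replaces the flat per-index pass with modulo branching and a precomputed wobble-position set by a chunked loop over codon starts that slices each codon once and fills its up-to-three positions directly, dropping the wobble set and the last_codon carry.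
import Mathlib
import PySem

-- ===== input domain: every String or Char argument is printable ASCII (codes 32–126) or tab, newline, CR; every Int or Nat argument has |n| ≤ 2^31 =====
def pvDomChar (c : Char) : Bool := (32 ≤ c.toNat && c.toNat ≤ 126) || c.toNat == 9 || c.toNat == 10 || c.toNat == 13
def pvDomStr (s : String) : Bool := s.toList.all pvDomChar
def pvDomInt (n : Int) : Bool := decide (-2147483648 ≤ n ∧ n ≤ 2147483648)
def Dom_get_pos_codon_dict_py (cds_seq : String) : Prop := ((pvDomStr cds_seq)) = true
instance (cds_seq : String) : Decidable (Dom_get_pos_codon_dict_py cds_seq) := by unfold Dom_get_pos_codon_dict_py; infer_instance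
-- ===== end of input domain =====

-- B replaces A's flat per-index pass (modulo branching + wobble-position set) by a chunked
-- loop over codon starts that slices each codon once and fills its up-to-three positions;
-- objective: simpler (same cost, no wobble set, no last_codon carry).

-- ===== PORT A =====
-- loop body of A's `for i in range(0, len(cds_seq))` (state: cds_dict, codon_pos, last_codon)
def pvStepA (cds_seq : String) (wobble : PySem.Set Int)
    (st : PySem.Dict Int (Int × String × Int) × Int × String) (i : Int) :
    PySem.Dict Int (Int × String × Int) × Int × String :=
  if PySem.Int.mod i 3 = 0 then
    let codon_pos := st.2.1 + 1
    let curr_codon := PySem.Str.slice cds_seq (some i) (some (i + 3))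
    (st.1.insert i (codon_pos, curr_codon, 0), codon_pos, curr_codon)
  else
    if wobble.contains i then
      (st.1.insert i (st.2.1, st.2.2, 2), st.2.1, st.2.2)
    else
      (st.1.insert i (st.2.1, st.2.2, 1), st.2.1, st.2.2)

def get_pos_codon_dict_py (cds_seq : String) : List (Int × Int × String × Int) :=
  let wobble : PySem.Set Int := PySem.Set.ofList (PySem.List.pyRange 2 (PySem.Str.len cds_seq) 3)
  ((PySem.List.pyRange 0 (PySem.Str.len cds_seq) 1).foldl (pvStepA cds_seq wobble)
    (PySem.Dict.empty, 0, "")).1.items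

-- ===== PORT B =====
-- B's inner `for j in range(3)` with its break (`start + j >= len(cds_seq)` ends the codon)
def pvInner (n start codon_pos : Int) (codon : String) :
    PySem.Dict Int (Int × String × Int) → List Int → PySem.Dict Int (Int × String × Int)
  | d, [] => d
  | d, j :: rest =>
      if n ≤ start + j then d
      else pvInner n start codon_pos codon (d.insert (start + j) (codon_pos, codon, j)) rest

-- B's outer loop body over codon starts (state: cds_dict, codon_pos)
def pvStepB (cds_seq : String) (n : Int)
    (st : PySem.Dict Int (Int × String × Int) × Int) (start : Int) :
    PySem.Dict Int (Int × String × Int) × Int :=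
  let codon_pos := st.2 + 1
  let codon := PySem.Str.slice cds_seq (some start) (some (start + 3))
  (pvInner n start codon_pos codon st.1 (PySem.List.pyRange 0 3 1), codon_pos)

def get_pos_codon_dict_py_alt (cds_seq : String) : List (Int × Int × String × Int) :=
  ((PySem.List.pyRange 0 (PySem.Str.len cds_seq) 3).foldl
    (pvStepB cds_seq (PySem.Str.len cds_seq)) (PySem.Dict.empty, 0)).1.items

-- ===== PRECONDITION & SPEC =====
def Spec_get_pos_codon_dict_py (cds_seq : String) (out : List (Int × Int × String × Int)) : Prop := out = get_pos_codon_dict_py_alt cds_seq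
instance (cds_seq : String) (out : List (Int × Int × String × Int)) : Decidable (Spec_get_pos_codon_dict_py cds_seq out) := by unfold Spec_get_pos_codon_dict_py; infer_instance

-- ===== CLAIM (what is proved, stated in full; the proofs are below) =====
def Claim_equal_get_pos_codon_dict_py : Prop := ∀ (cds_seq : String), Dom_get_pos_codon_dict_py cds_seq → Spec_get_pos_codon_dict_py cds_seq (get_pos_codon_dict_py cds_seq)

-- ===== LEMMAS AND PROOFS =====

-- codon slice starting at index 3*k
def pvCodon (s : String) (k : Nat) : String :=
  PySem.Str.slice s (some (3 * (k : Int))) (some (3 * (k : Int) + 3))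

-- the dict entry both programs record for CDS index i = 3*(i/3) + i%3
def pvEntry (s : String) (i : Nat) : Int × Int × String × Int :=
  ((i : Int), ((i / 3 : Nat) : Int) + 1, pvCodon s (i / 3), ((i % 3 : Nat) : Int))

-- A's codon_pos / last_codon after the first m loop iterations
def pvCp (m : Nat) : Int := (((m + 2) / 3 : Nat) : Int)
def pvLc (s : String) (m : Nat) : String := if m = 0 then "" else pvCodon s ((m - 1) / 3)

lemma pvEntry_eq (s : String) (k j : Nat) (hj : j < 3) :
    pvEntry s (3 * k + j) =
      (((3 * k + j : Nat) : Int), ((k : Int) + 1, pvCodon s k, (j : Int))) := by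
  have h1 : (3 * k + j) / 3 = k := by omega
  have h2 : (3 * k + j) % 3 = j := by omega
  simp [pvEntry, h1, h2]

lemma pvFresh (s : String) (M : Nat) (v : Int × String × Int) :
    (PySem.Dict.mk ((List.range M).map (pvEntry s))).insert (M : Int) v =
      PySem.Dict.mk ((List.range M).map (pvEntry s) ++ [((M : Int), v)]) := by
  have hc : (PySem.Dict.mk ((List.range M).map (pvEntry s))).contains (M : Int) = false := by
    rw [PySem.Dict.contains_mk]
    simp only [List.any_eq_false]
    intro p hp
    simp only [List.mem_map, List.mem_range] at hp
    obtain ⟨i, hi, rfl⟩ := hp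
    simp [pvEntry]
    omega
  apply PySem.Dict.ext
  rw [PySem.Dict.items_insert_of_not_contains _ _ hc]

lemma pvRangeSucc (s : String) (M : Nat) (v : Int × String × Int)
    (hv : pvEntry s M = ((M : Int), v)) :
    (List.range M).map (pvEntry s) ++ [((M : Int), v)] = (List.range (M + 1)).map (pvEntry s) := by
  rw [List.range_succ, List.map_append, List.map_singleton, hv]

lemma pvInsertStep (s : String) (M : Nat) (v : Int × String × Int)
    (hv : pvEntry s M = ((M : Int), v)) :
    (PySem.Dict.mk ((List.range M).map (pvEntry s))).insert (M : Int) v =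
      PySem.Dict.mk ((List.range (M + 1)).map (pvEntry s)) := by
  rw [pvFresh, pvRangeSucc s M v hv]

lemma pvStepA_eq (s : String) (m : Nat) (hm : m < s.toList.length) :
    pvStepA s (PySem.Set.ofList (PySem.List.pyRange 2 (s.toList.length : Int) 3))
      (PySem.Dict.mk ((List.range m).map (pvEntry s)), pvCp m, pvLc s m) (m : Int) =
    (PySem.Dict.mk ((List.range (m + 1)).map (pvEntry s)), pvCp (m + 1), pvLc s (m + 1)) := by
  have hwob : ((PySem.Set.ofList (PySem.List.pyRange 2 (s.toList.length : Int) 3)).contains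
      (m : Int)) = true ↔ (2 ≤ (m : Int) ∧ (m : Int) < (s.toList.length : Int) ∧ (3 : Int) ∣ (m : Int) - 2) := by
    rw [show ∀ (t : PySem.Set Int) (x : Int), t.contains x = List.contains t x from fun _ _ => rfl,
      List.contains_iff_mem, PySem.Set.mem_ofList,
      PySem.List.mem_pyRange_iff_of_pos (by norm_num)]
  have hmod : PySem.Int.mod (m : Int) 3 = (m : Int) % 3 :=
    PySem.Int.mod_eq_emod_of_pos (by norm_num)
  have h3 : m % 3 = 0 ∨ m % 3 = 1 ∨ m % 3 = 2 := by omega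
  rcases h3 with h3 | h3 | h3
  · -- first base of a codon
    rw [pvStepA, if_pos (by rw [hmod]; omega)]
    simp only [Prod.mk.injEq]
    have hcur : PySem.Str.slice s (some (m : Int)) (some ((m : Int) + 3)) = pvCodon s (m / 3) := by
      rw [pvCodon]
      have h1 : (3 * ((m / 3 : Nat) : Int)) = (m : Int) := by omega
      rw [h1]
    have hcp : pvCp m + 1 = ((m / 3 : Nat) : Int) + 1 := by
      simp only [pvCp]; omega
    refine ⟨?_, ?_, ?_⟩
    · rw [hcur, hcp]
      apply pvInsertStep
      have := pvEntry_eq s (m / 3) 0 (by omega)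
      have hmk : 3 * (m / 3) + 0 = m := by omega
      rw [hmk] at this
      simpa using this
    · simp only [pvCp]; omega
    · rw [hcur]
      simp only [pvLc, Nat.add_sub_cancel, if_neg (Nat.succ_ne_zero m)]
  · -- middle base
    have hw : ((PySem.Set.ofList (PySem.List.pyRange 2 (s.toList.length : Int) 3)).contains
        (m : Int)) = false := by
      apply Bool.eq_false_iff.mpr
      intro h
      have := (hwob.mp h).2.2
      omega
    rw [pvStepA, if_neg (by rw [hmod]; omega), hw]
    simp only [Bool.false_eq_true, if_false, Prod.mk.injEq]
    have hm0 : m ≠ 0 := by omega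
    have hlc : pvLc s m = pvCodon s (m / 3) := by
      rw [pvLc, if_neg hm0]
      have : (m - 1) / 3 = m / 3 := by omega
      rw [this]
    have hcp : pvCp m = ((m / 3 : Nat) : Int) + 1 := by simp only [pvCp]; omega
    refine ⟨?_, ?_, ?_⟩
    · rw [hlc, hcp]
      apply pvInsertStep
      have := pvEntry_eq s (m / 3) 1 (by omega)
      have hmk : 3 * (m / 3) + 1 = m := by omega
      rw [hmk] at this
      simpa using this
    · simp only [pvCp]; omega
    · rw [hlc]
      simp only [pvLc, Nat.add_sub_cancel, if_neg (Nat.succ_ne_zero m)]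
  · -- wobble base
    have hw : ((PySem.Set.ofList (PySem.List.pyRange 2 (s.toList.length : Int) 3)).contains
        (m : Int)) = true := by
      apply hwob.mpr
      refine ⟨by omega, by omega, ?_⟩
      omega
    rw [pvStepA, if_neg (by rw [hmod]; omega), hw]
    simp only [if_true, Prod.mk.injEq]
    have hm0 : m ≠ 0 := by omega
    have hlc : pvLc s m = pvCodon s (m / 3) := by
      rw [pvLc, if_neg hm0]
      have : (m - 1) / 3 = m / 3 := by omega
      rw [this]
    have hcp : pvCp m = ((m / 3 : Nat) : Int) + 1 := by simp only [pvCp]; omega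
    refine ⟨?_, ?_, ?_⟩
    · rw [hlc, hcp]
      apply pvInsertStep
      have := pvEntry_eq s (m / 3) 2 (by omega)
      have hmk : 3 * (m / 3) + 2 = m := by omega
      rw [hmk] at this
      simpa using this
    · simp only [pvCp]; omega
    · rw [hlc]
      simp only [pvLc, Nat.add_sub_cancel, if_neg (Nat.succ_ne_zero m)]

lemma lemA (s : String) :
    ∀ m : Nat, m ≤ s.toList.length →
      (PySem.List.pyRange 0 (m : Int) 1).foldl
        (pvStepA s (PySem.Set.ofList (PySem.List.pyRange 2 (s.toList.length : Int) 3)))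
        (PySem.Dict.empty, 0, "") =
      (PySem.Dict.mk ((List.range m).map (pvEntry s)), pvCp m, pvLc s m) := by
  intro m
  induction m with
  | zero =>
    intro _
    rw [show ((0 : Nat) : Int) = 0 by norm_num, PySem.List.pyRange_one_eq_nil (by norm_num)]
    rfl
  | succ m ih =>
    intro hm
    have hm' : m < s.toList.length := by omega
    have hcast : ((m + 1 : Nat) : Int) = (m : Int) + 1 := by push_cast; ring
    rw [hcast, PySem.List.pyRange_one_succ_right (by positivity), List.foldl_append,
      ih (by omega), List.foldl_cons, List.foldl_nil, pvStepA_eq s m hm']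

lemma pvInner_eq (s : String) (n k : Nat) (hk : 3 * k < n) :
    pvInner (n : Int) (3 * (k : Int)) ((k : Int) + 1) (pvCodon s k)
      (PySem.Dict.mk ((List.range (3 * k)).map (pvEntry s))) (PySem.List.pyRange 0 3 1) =
    PySem.Dict.mk ((List.range (min (3 * k + 3) n)).map (pvEntry s)) := by
  have hR : PySem.List.pyRange 0 3 1 = [0, 1, 2] := by decide
  rw [hR]
  have hv0 := pvEntry_eq s k 0 (by omega)
  have hv1 := pvEntry_eq s k 1 (by omega)
  have hv2 := pvEntry_eq s k 2 (by omega)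
  have hkey0 : (3 * (k : Int) + 0) = ((3 * k : Nat) : Int) := by push_cast; ring
  have hkey1 : (3 * (k : Int) + 1) = ((3 * k + 1 : Nat) : Int) := by push_cast; ring
  have hkey2 : (3 * (k : Int) + 2) = ((3 * k + 2 : Nat) : Int) := by push_cast; ring
  have hcase : n = 3 * k + 1 ∨ n = 3 * k + 2 ∨ 3 * k + 3 ≤ n := by omega
  rcases hcase with hc | hc | hc
  · have hmin : min (3 * k + 3) n = 3 * k + 1 := by omega
    rw [hmin, pvInner, if_neg (by omega), pvInner, if_pos (by omega)]
    rw [hkey0, pvInsertStep s (3 * k) _ (by simpa using hv0)]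
  · have hmin : min (3 * k + 3) n = 3 * k + 2 := by omega
    rw [hmin, pvInner, if_neg (by omega),
      hkey0, pvInsertStep s (3 * k) _ (by simpa using hv0),
      pvInner, if_neg (by omega),
      hkey1, pvInsertStep s (3 * k + 1) _ (by simpa using hv1),
      pvInner, if_pos (by omega)]
  · have hmin : min (3 * k + 3) n = 3 * k + 3 := by omega
    rw [hmin, pvInner, if_neg (by omega),
      hkey0, pvInsertStep s (3 * k) _ (by simpa using hv0),
      pvInner, if_neg (by omega),
      hkey1, pvInsertStep s (3 * k + 1) _ (by simpa using hv1),
      pvInner, if_neg (by omega),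
      hkey2, pvInsertStep s (3 * k + 2) _ (by simpa using hv2),
      pvInner]

lemma lemB (s : String) :
    ∀ k : Nat, k ≤ (s.toList.length + 2) / 3 →
      (List.range k).foldl
        (fun st (t : Nat) => pvStepB s (s.toList.length : Int) st (0 + 3 * (t : Int)))
        (PySem.Dict.empty, 0) =
      (PySem.Dict.mk ((List.range (min (3 * k) s.toList.length)).map (pvEntry s)), (k : Int)) := by
  intro k
  induction k with
  | zero => intro _; rfl
  | succ k ih =>
    intro hk
    have hlt : 3 * k < s.toList.length := by omega
    rw [List.range_succ, List.foldl_append, ih (by omega), List.foldl_cons, List.foldl_nil]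
    rw [pvStepB]
    have h0 : (0 : Int) + 3 * (k : Int) = 3 * (k : Int) := by ring
    simp only [h0]
    have hmin : min (3 * k) s.toList.length = 3 * k := by omega
    rw [hmin]
    have : PySem.Str.slice s (some (3 * (k : Int))) (some (3 * (k : Int) + 3)) = pvCodon s k := rfl
    rw [this, pvInner_eq s s.toList.length k hlt]
    have h31 : 3 * (k + 1) = 3 * k + 3 := by ring
    rw [h31]
    push_cast
    rfl

theorem pv_main (s : String) : get_pos_codon_dict_py s = get_pos_codon_dict_py_alt s := by
  have hlen : PySem.Str.len s = (s.toList.length : Int) := by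
    simp [PySem.Str.len_eq]
  rw [get_pos_codon_dict_py, get_pos_codon_dict_py_alt, hlen]
  rw [lemA s s.toList.length le_rfl]
  rw [PySem.List.pyRange_of_pos 0 (s.toList.length : Int) (by norm_num)]
  have hcount : (if (0 : Int) < (s.toList.length : Int)
      then (((s.toList.length : Int) - 0 + 3 - 1) / 3).toNat else 0) = (s.toList.length + 2) / 3 := by
    split <;> omega
  rw [hcount, List.foldl_map, lemB s _ le_rfl]
  have hmin : min (3 * ((s.toList.length + 2) / 3)) s.toList.length = s.toList.length := by omega
  rw [hmin]

-- ===== VERDICT (by name: the statement is the Claim_ definition above) =====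
theorem get_pos_codon_dict_py_spec : Claim_equal_get_pos_codon_dict_py := by
  intro s _
  unfold Spec_get_pos_codon_dict_py
  exact pv_main s
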